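-- pv_equiv track=rewrite | github.com/Zenobia000/iSpan_python-DA-cookbooks | advance/competition/Data_mining/signal-process/新手友善/batch_analysis3.py | group_and_median
-- ===== SOURCE A (Python) =====
-- def group_and_median(arr, valid_range):
--     if len(arr) == 0:
--         return []
--
--     # 初始化
--     result = []
--     group = [arr[0]]
--
--     for i in range(1, len(arr)):
--         if abs(arr[i] - arr[i-1]) < valid_range:
--             # 若差異小於 valid_range，加入群組
--             group.append(arr[i])
--         else:
--             # 若差異不小於 valid_range，則處理當前群組
--             if len(group) % 2 == 0:
--                 # 偶數個元素，取中間前一個值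
--                 median_value = sorted(group)[len(group)//2 - 1]
--             else:
--                 # 奇數個元素，取中間值
--                 median_value = sorted(group)[len(group)//2]
--             result.append(median_value)
--             group = [arr[i]]  # 開始新的群組
--
--     # 處理最後一個群組
--     if len(group) % 2 == 0:
--         median_value = sorted(group)[len(group)//2 - 1]
--     else:
--         median_value = sorted(group)[len(group)//2]
--     result.append(median_value)
--
--     return result
-- ===== SOURCE B (Python) =====
-- def _select(xs, k):
--     # iterative quickselect: k-th smallest of xs (0-based), middle pivot
--     while True:
--         p = xs[len(xs) // 2]
--         lt = [x for x in xs if x < p]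
--         if k < len(lt):
--             xs = lt
--             continue
--         eq = sum(1 for x in xs if x == p)
--         if k < len(lt) + eq:
--             return p
--         xs = [x for x in xs if x > p]
--         k -= len(lt) + eq
--
--
-- def group_and_median(arr, valid_range):
--     if not arr:
--         return []
--     groups = []
--     cur = [arr[0]]
--     for x in arr[1:]:
--         if abs(x - cur[-1]) < valid_range:
--             cur.append(x)
--         else:
--             groups.append(cur)
--             cur = [x]
--     groups.append(cur)
--     # low median is the (len-1)//2 ranked element, no parity split, no sort
--     return [_select(g, (len(g) - 1) // 2) for g in groups]
-- ===== Notes on version B (the rewrite author's own statement) =====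
-- stated objective: alternative
-- what changed: B collects the groups first with an element-wise pass (no index arithmetic), then maps an iterative quickselect (middle pivot, three-way partition) that finds the (len-1)//2 ranked element of each group directly, replacing A's per-group full sort and even/odd index branch.
import Mathlib
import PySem

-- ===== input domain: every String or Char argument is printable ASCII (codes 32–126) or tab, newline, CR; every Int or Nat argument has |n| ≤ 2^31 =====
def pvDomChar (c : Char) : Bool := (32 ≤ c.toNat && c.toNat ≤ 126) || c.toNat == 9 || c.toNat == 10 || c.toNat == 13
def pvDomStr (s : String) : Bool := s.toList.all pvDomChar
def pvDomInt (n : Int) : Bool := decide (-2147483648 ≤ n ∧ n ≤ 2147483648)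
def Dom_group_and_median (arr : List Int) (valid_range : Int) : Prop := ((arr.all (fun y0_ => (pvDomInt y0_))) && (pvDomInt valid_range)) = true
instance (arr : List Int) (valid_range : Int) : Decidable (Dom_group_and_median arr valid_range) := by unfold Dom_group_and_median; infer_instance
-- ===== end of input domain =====

-- B replaces A's per-group full sort + parity branch by group collection and an
-- iterative quickselect for the (len-1)//2 ranked element (alternative algorithm, not timed faster).

-- ===== PORT A =====
def group_and_median (arr : List Int) (valid_range : Int) : List Int :=
  if arr.length == 0 then []
  else
    let st := (PySem.List.pyRange 1 arr.length 1).foldl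
      (fun (st : List Int × List Int) i =>
        let result := st.1
        let group := st.2
        if |PySem.List.pyGetD arr i 0 - PySem.List.pyGetD arr (i - 1) 0| < valid_range then
          (result, group ++ [PySem.List.pyGetD arr i 0])
        else
          let median_value :=
            if PySem.Int.mod (group.length : Int) 2 == 0 then
              PySem.List.pyGetD (PySem.List.sorted group (fun x => x) false)
                (PySem.Int.floordiv (group.length : Int) 2 - 1) 0
            else
              PySem.List.pyGetD (PySem.List.sorted group (fun x => x) false)
                (PySem.Int.floordiv (group.length : Int) 2) 0
          (result ++ [median_value], [PySem.List.pyGetD arr i 0]))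
      ([], [PySem.List.pyGetD arr 0 0])
    let median_value :=
      if PySem.Int.mod (st.2.length : Int) 2 == 0 then
        PySem.List.pyGetD (PySem.List.sorted st.2 (fun x => x) false)
          (PySem.Int.floordiv (st.2.length : Int) 2 - 1) 0
      else
        PySem.List.pyGetD (PySem.List.sorted st.2 (fun x => x) false)
          (PySem.Int.floordiv (st.2.length : Int) 2) 0
    st.1 ++ [median_value]

-- ===== PORT B =====
-- termination fact for the quickselect loop (cited by decreasing_by)
theorem pvPivot_mem (xs : List Int) (h : ¬ xs = []) :
    PySem.List.pyGetD xs (PySem.Int.floordiv (xs.length : Int) 2) 2000000000 ∈ xs := by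
  have hl : 0 < xs.length := List.length_pos_iff.mpr h
  have : PySem.Int.floordiv (xs.length : Int) 2 = ((xs.length / 2 : Nat) : Int) := by
    exact_mod_cast PySem.Int.floordiv_natCast xs.length 2
  rw [this, PySem.List.pyGetD_natCast, List.getD_eq_getElem _ _ (by omega)]
  exact List.getElem_mem _

-- iterative quickselect from Source B (while-loop state (xs, k) as tail recursion)
def selectB (xs : List Int) (k : Int) : Int :=
  if h : xs = [] then 0  -- unreachable: Source B's xs[len//2] would raise IndexError; B never reaches it
  else
    let p := PySem.List.pyGetD xs (PySem.Int.floordiv (xs.length : Int) 2) 2000000000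
    let lt := xs.filter (fun x => x < p)
    if k < (lt.length : Int) then selectB lt k
    else
      let eq := (xs.filter (fun x => x == p)).length
      if k < (lt.length : Int) + eq then p
      else selectB (xs.filter (fun x => p < x)) (k - lt.length - eq)
termination_by xs.length
decreasing_by
  all_goals
    simp only [List.length_unattach]
    refine lt_of_lt_of_eq ?_ (List.length_attach (l := xs))
    exact List.length_filter_lt_length_iff_exists.mpr ⟨⟨_, pvPivot_mem xs h⟩, List.mem_attach _ _, by simp⟩

def group_and_median_alt (arr : List Int) (valid_range : Int) : List Int :=
  if arr = [] then []
  else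
    let st := (PySem.List.slice arr (some 1) none).foldl
      (fun (st : List (List Int) × List Int) x =>
        let groups := st.1
        let cur := st.2
        if |x - PySem.List.pyGetD cur (-1) 0| < valid_range then
          (groups, cur ++ [x])
        else
          (groups ++ [cur], [x]))
      ([], [PySem.List.pyGetD arr 0 0])
    (st.1 ++ [st.2]).map (fun g => selectB g (PySem.Int.floordiv ((g.length : Int) - 1) 2))

-- ===== PRECONDITION & SPEC =====
def Spec_group_and_median (arr : List Int) (valid_range : Int) (out : List Int) : Prop := out = group_and_median_alt arr valid_range
instance (arr : List Int) (valid_range : Int) (out : List Int) : Decidable (Spec_group_and_median arr valid_range out) := by unfold Spec_group_and_median; infer_instance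

-- ===== CLAIM (what is proved, stated in full; the proofs are below) =====
def Claim_equal_group_and_median : Prop := ∀ (arr : List Int) (valid_range : Int), Dom_group_and_median arr valid_range → Spec_group_and_median arr valid_range (group_and_median arr valid_range)

-- ===== LEMMAS AND PROOFS =====


-- median expression as A computes it (for reasoning about the ports; same body as the inline code of port A)
def pvMedA (group : List Int) : Int :=
  if PySem.Int.mod (group.length : Int) 2 == 0 then
    PySem.List.pyGetD (PySem.List.sorted group (fun x => x) false)
      (PySem.Int.floordiv (group.length : Int) 2 - 1) 0
  else
    PySem.List.pyGetD (PySem.List.sorted group (fun x => x) false)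
      (PySem.Int.floordiv (group.length : Int) 2) 0

-- A's loop body, abstracted over the adjacent pair (prev, cur)
def pvFA (v : Int) (st : List Int × List Int) (prev cur : Int) : List Int × List Int :=
  if |cur - prev| < v then (st.1, st.2 ++ [cur]) else (st.1 ++ [pvMedA st.2], [cur])

-- B's loop body
def pvFB (v : Int) (st : List (List Int) × List Int) (x : Int) : List (List Int) × List Int :=
  if |x - PySem.List.pyGetD st.2 (-1) 0| < v then (st.1, st.2 ++ [x]) else (st.1 ++ [st.2], [x])

-- structural form of A's index loop: walk adjacent pairs
def pvPairFold {σ : Type} (f : σ → Int → Int → σ) : Int → List Int → σ → σ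
  | _, [], s => s
  | prev, c :: r, s => pvPairFold f c r (f s prev c)

theorem pvIdxFold {σ : Type} (f : σ → Int → Int → σ) (arr : List Int) :
    ∀ (fuel m : Nat) (s : σ), arr.length ≤ m + fuel → m < arr.length →
    (PySem.List.pyRange ((m : Int) + 1) arr.length 1).foldl
        (fun st i => f st (PySem.List.pyGetD arr (i - 1) 0) (PySem.List.pyGetD arr i 0)) s
      = pvPairFold f (arr.getD m 0) (arr.drop (m + 1)) s := by
  intro fuel
  induction fuel with
  | zero => intro m s h1 h2; omega
  | succ n ih =>
    intro m s h1 h2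
    by_cases hlt : m + 1 < arr.length
    · rw [PySem.List.pyRange_one_cons (by omega)]
      rw [List.foldl_cons]
      have e1 : ((m : Int) + 1) - 1 = (m : Int) := by ring
      have e2 : ((m : Int) + 1) = ((m + 1 : Nat) : Int) := by push_cast; ring
      rw [e1, e2, PySem.List.pyGetD_natCast, PySem.List.pyGetD_natCast]
      rw [ih (m + 1) _ (by omega) hlt]
      rw [List.drop_eq_getElem_cons hlt]
      rw [pvPairFold]
      rw [List.getD_eq_getElem _ _ hlt, List.getD_eq_getElem _ _ (by omega)]
    · have hr : PySem.List.pyRange ((m : Int) + 1) arr.length 1 = [] :=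
        PySem.List.pyRange_one_eq_nil (by omega)
      have hd : arr.drop (m + 1) = [] := List.drop_eq_nil_of_le (by omega)
      rw [hr, hd]
      rfl

theorem pvLastNeg (l : List Int) (x : Int) (h : l.getLast? = some x) :
    PySem.List.pyGetD l (-1) 0 = x := by
  have hne : l ≠ [] := by rintro rfl; simp at h
  have h1 : 0 < l.length := List.length_pos_iff.mpr hne
  have h2 := PySem.List.pyGetD_neg_natCast (xs := l) (k := 1) (d := 0) (by omega) (by omega)
  rw [show (-1 : Int) = -((1 : Nat) : Int) by norm_num, h2]
  have h3 : l.getLast? = some (l[l.length - 1]) := by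
    rw [List.getLast?_eq_getElem?, List.getElem?_eq_getElem (by omega)]
  rw [h3] at h
  exact (Option.some_inj.mp h)

theorem pvSortedDecomp (xs : List Int) (p : Int) :
    PySem.List.sorted xs (fun x => x) false =
      PySem.List.sorted (xs.filter (fun x => decide (x < p))) (fun x => x) false
      ++ xs.filter (fun x => x == p)
      ++ PySem.List.sorted (xs.filter (fun x => decide (p < x))) (fun x => x) false := by
  have hp1 := List.filter_append_perm (fun x => decide (x < p)) xs
  have hp2 := List.filter_append_perm (fun x => x == p) (xs.filter (fun x => !decide (x < p)))
  have e1 : (xs.filter (fun x => !decide (x < p))).filter (fun x => x == p)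
      = xs.filter (fun x => x == p) := by
    rw [List.filter_filter]
    apply List.filter_congr
    intro x _
    by_cases hx : x = p
    · subst hx; simp
    · simp [hx]
  have e2 : (xs.filter (fun x => !decide (x < p))).filter (fun x => !(x == p))
      = xs.filter (fun x => decide (p < x)) := by
    rw [List.filter_filter]
    apply List.filter_congr
    intro x _
    by_cases h2 : x = p
    · subst h2; simp
    · by_cases h1 : x < p
      · have h3 : ¬ p < x := by omega
        simp [h1, h3]
      · have h3 : p < x := by omega
        simp [h1, h2, h3]
  rw [e1, e2] at hp2
  apply PySem.List.sorted_id_eq_of_perm_of_pairwise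
  · refine List.Perm.trans (List.Perm.append (List.Perm.append (PySem.List.sorted_perm _ _ _)
        (List.Perm.refl _)) (PySem.List.sorted_perm _ _ _)) ?_
    rw [List.append_assoc]
    exact List.Perm.trans (List.Perm.append_left _ hp2) hp1
  · have hlt : ∀ a ∈ PySem.List.sorted (xs.filter (fun x => decide (x < p))) (fun x => x) false,
        a < p := by
      intro a ha
      have := List.of_mem_filter ((PySem.List.mem_sorted _ _ _ _).mp ha)
      simpa using this
    have hgt : ∀ a ∈ PySem.List.sorted (xs.filter (fun x => decide (p < x))) (fun x => x) false,
        p < a := by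
      intro a ha
      have := List.of_mem_filter ((PySem.List.mem_sorted _ _ _ _).mp ha)
      simpa using this
    have hmid : ∀ a ∈ xs.filter (fun x => x == p), a = p := by
      intro a ha
      have := List.of_mem_filter ha
      simpa using this
    rw [List.append_assoc]
    refine List.pairwise_append.mpr ⟨?_, List.pairwise_append.mpr ⟨?_, ?_, ?_⟩, ?_⟩
    · simpa using PySem.List.sorted_pairwise (xs.filter (fun x => decide (x < p))) (fun x => x)
    · exact List.pairwise_of_forall_mem_list (fun a ha b hb => by rw [hmid a ha, hmid b hb])
    · simpa using PySem.List.sorted_pairwise (xs.filter (fun x => decide (p < x))) (fun x => x)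
    · intro a ha b hb
      rw [hmid a ha]
      exact le_of_lt (hgt b hb)
    · intro a ha b hb
      rcases List.mem_append.mp hb with h | h
      · rw [hmid b h]; exact le_of_lt (hlt a ha)
      · exact le_of_lt (lt_trans (hlt a ha) (hgt b h))

theorem pvSelectB_correct : ∀ (n : Nat) (xs : List Int) (k : Int), xs.length ≤ n → 0 ≤ k → k < xs.length →
    selectB xs k = (PySem.List.sorted xs (fun x => x) false).getD k.toNat 0 := by
  intro n
  induction n with
  | zero => intro xs k h1 h2 h3; omega
  | succ n ih =>
    intro xs k h1 h2 h3
    have hne : xs ≠ [] := by rintro rfl; simp at h3; omega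
    have hpmem : PySem.List.pyGetD xs (PySem.Int.floordiv (xs.length : Int) 2) 2000000000 ∈ xs :=
      pvPivot_mem xs hne
    set p : Int := PySem.List.pyGetD xs (PySem.Int.floordiv (xs.length : Int) 2) 2000000000 with hp
    have hdec := pvSortedDecomp xs p
    have hlen := congrArg List.length hdec
    simp only [List.length_append, PySem.List.length_sorted] at hlen
    have hmidmem : p ∈ xs.filter (fun x => x == p) := List.mem_filter.mpr ⟨hpmem, by simp⟩
    have hmidpos : 0 < (xs.filter (fun x => x == p)).length := List.length_pos_iff.mpr
      (fun hmid => by rw [hmid] at hmidmem; simp at hmidmem)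
    rw [selectB, dif_neg hne]
    show (if k < ((xs.filter (fun x => decide (x < p))).length : Int) then
        selectB (xs.filter (fun x => decide (x < p))) k
      else if k < ((xs.filter (fun x => decide (x < p))).length : Int)
          + ((xs.filter (fun x => x == p)).length : Int) then p
      else selectB (xs.filter (fun x => decide (p < x)))
        (k - ((xs.filter (fun x => decide (x < p))).length : Int)
          - ((xs.filter (fun x => x == p)).length : Int)))
      = (PySem.List.sorted xs (fun x => x) false).getD k.toNat 0
    have hllt : (xs.filter (fun x => decide (x < p))).length ≤ xs.length := List.length_filter_le _ _
    split_ifs with hk1 hk2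
    · have hklt : k.toNat < (xs.filter (fun x => decide (x < p))).length := by omega
      rw [ih _ k (by omega) h2 (by exact_mod_cast hk1)]
      rw [hdec, List.getD_append _ _ _ _ (by
        simp only [List.length_append, PySem.List.length_sorted]; omega),
        List.getD_append _ _ _ _ (by simp only [PySem.List.length_sorted]; omega)]
    · rw [hdec, List.getD_append _ _ _ _ (by
        simp only [List.length_append, PySem.List.length_sorted]; omega),
        List.getD_append_right _ _ _ _ (by simp only [PySem.List.length_sorted]; omega)]
      have hi : k.toNat - (PySem.List.sorted (xs.filter (fun x => decide (x < p))) (fun x => x) false).length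
          < (xs.filter (fun x => x == p)).length := by
        simp only [PySem.List.length_sorted]; omega
      rw [List.getD_eq_getElem _ _ hi]
      have hm := List.getElem_mem hi
      have h5 : (xs.filter (fun x => x == p))[k.toNat
          - (PySem.List.sorted (xs.filter (fun x => decide (x < p))) (fun x => x) false).length] = p := by
        simpa using List.of_mem_filter hm
      exact h5.symm
    · have hglen : (xs.filter (fun x => decide (p < x))).length ≤ n := by omega
      have hk0 : 0 ≤ k - ((xs.filter (fun x => decide (x < p))).length : Int)
          - ((xs.filter (fun x => x == p)).length : Int) := by omega
      have hkb : k - ((xs.filter (fun x => decide (x < p))).length : Int)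
          - ((xs.filter (fun x => x == p)).length : Int)
          < ((xs.filter (fun x => decide (p < x))).length : Int) := by omega
      rw [ih _ _ hglen hk0 hkb]
      rw [hdec, List.getD_append_right _ _ _ _ (by
        simp only [List.length_append, PySem.List.length_sorted]; omega)]
      congr 1
      simp only [List.length_append, PySem.List.length_sorted]
      omega

theorem pvMed_eq (g : List Int) (h : g ≠ []) :
    pvMedA g = selectB g (PySem.Int.floordiv ((g.length : Int) - 1) 2) := by
  have h1 : 0 < g.length := List.length_pos_iff.mpr h
  have e1 : PySem.Int.floordiv ((g.length : Int) - 1) 2 = ((g.length : Int) - 1) / 2 :=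
    PySem.Int.floordiv_eq_ediv_of_pos (by norm_num)
  have e2 : PySem.Int.floordiv ((g.length : Int)) 2 = (g.length : Int) / 2 :=
    PySem.Int.floordiv_eq_ediv_of_pos (by norm_num)
  have e3 : PySem.Int.mod ((g.length : Int)) 2 = (g.length : Int) % 2 :=
    PySem.Int.mod_eq_emod_of_pos (by norm_num)
  rw [pvSelectB_correct g.length g _ le_rfl (by rw [e1]; omega) (by rw [e1]; omega)]
  unfold pvMedA
  rw [e2, e3, e1]
  split_ifs with hpar
  · have hev : (g.length : Int) % 2 = 0 := by simpa using hpar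
    rw [PySem.List.pyGetD_eq_getElem _ _ (by omega)
      (by rw [PySem.List.length_sorted]; omega)]
    rw [List.getD_eq_getElem _ _ (by rw [PySem.List.length_sorted]; omega)]
    congr 1
    omega
  · have hod : ¬ (g.length : Int) % 2 = 0 := by simpa using hpar
    rw [PySem.List.pyGetD_eq_getElem _ _ (by omega)
      (by rw [PySem.List.length_sorted]; omega)]
    rw [List.getD_eq_getElem _ _ (by rw [PySem.List.length_sorted]; omega)]
    congr 1
    omega

theorem pvLoop (v : Int) : ∀ (t : List Int) (groups : List (List Int)) (grp : List Int) (prev : Int),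
    grp ≠ [] → grp.getLast? = some prev → (∀ g ∈ groups, g ≠ []) →
    (pvPairFold (pvFA v) prev t (groups.map pvMedA, grp)
        = ((t.foldl (pvFB v) (groups, grp)).1.map pvMedA, (t.foldl (pvFB v) (groups, grp)).2))
    ∧ (t.foldl (pvFB v) (groups, grp)).2 ≠ []
    ∧ (∀ g ∈ (t.foldl (pvFB v) (groups, grp)).1, g ≠ []) := by
  intro t
  induction t with
  | nil => intro groups grp prev hne _ hGr; exact ⟨rfl, hne, hGr⟩
  | cons x r ih =>
    intro groups grp prev hne hl hGr
    have hlast : PySem.List.pyGetD grp (-1) 0 = prev := pvLastNeg grp prev hl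
    simp only [List.foldl_cons, pvPairFold]
    by_cases hc : |x - prev| < v
    · have stepB : pvFB v (groups, grp) x = (groups, grp ++ [x]) := by
        simp [pvFB, hlast, hc]
      have stepA : pvFA v (groups.map pvMedA, grp) prev x = (groups.map pvMedA, grp ++ [x]) := by
        simp [pvFA, hc]
      rw [stepB, stepA]
      exact ih groups (grp ++ [x]) x (by simp) (by simp) hGr
    · have stepB : pvFB v (groups, grp) x = (groups ++ [grp], [x]) := by
        simp [pvFB, hlast, hc]
      have stepA : pvFA v (groups.map pvMedA, grp) prev x = ((groups ++ [grp]).map pvMedA, [x]) := by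
        simp [pvFA, hc]
      rw [stepB, stepA]
      refine ih (groups ++ [grp]) [x] x (by simp) (by simp) ?_
      intro g hg
      rcases List.mem_append.mp hg with h | h
      · exact hGr g h
      · simp only [List.mem_singleton] at h; subst h; exact hne

theorem pvA_char (a : Int) (t : List Int) (v : Int) :
    group_and_median (a :: t) v =
      (pvPairFold (pvFA v) a t ([], [a])).1 ++ [pvMedA (pvPairFold (pvFA v) a t ([], [a])).2] := by
  have hfold := pvIdxFold (pvFA v) (a :: t) ((a :: t).length) 0
      ([], [PySem.List.pyGetD (a :: t) 0 0]) (by omega) (by simp)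
  rw [show ((0 : Nat) : Int) + 1 = 1 by norm_num, List.getD_cons_zero, List.drop_succ_cons,
    List.drop_zero, show PySem.List.pyGetD (a :: t) 0 0 = a by simp] at hfold
  have hbody : (fun (st : List Int × List Int) (i : Int) =>
        let result := st.1
        let group := st.2
        if |PySem.List.pyGetD (a :: t) i 0 - PySem.List.pyGetD (a :: t) (i - 1) 0| < v then
          (result, group ++ [PySem.List.pyGetD (a :: t) i 0])
        else
          let median_value :=
            if PySem.Int.mod (group.length : Int) 2 == 0 then
              PySem.List.pyGetD (PySem.List.sorted group (fun x => x) false)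
                (PySem.Int.floordiv (group.length : Int) 2 - 1) 0
            else
              PySem.List.pyGetD (PySem.List.sorted group (fun x => x) false)
                (PySem.Int.floordiv (group.length : Int) 2) 0
          (result ++ [median_value], [PySem.List.pyGetD (a :: t) i 0]))
      = (fun st i => pvFA v st (PySem.List.pyGetD (a :: t) (i - 1) 0)
          (PySem.List.pyGetD (a :: t) i 0)) := rfl
  unfold group_and_median
  rw [if_neg (by simp), show PySem.List.pyGetD (a :: t) 0 0 = a by simp, hbody, hfold]
  rfl

theorem pvB_char (a : Int) (t : List Int) (v : Int) :
    group_and_median_alt (a :: t) v =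
      ((t.foldl (pvFB v) ([], [a])).1 ++ [(t.foldl (pvFB v) ([], [a])).2]).map
        (fun g => selectB g (PySem.Int.floordiv ((g.length : Int) - 1) 2)) := by
  unfold group_and_median_alt
  rw [if_neg (by simp), PySem.List.slice_from_one,
    show PySem.List.pyGetD (a :: t) 0 0 = a by simp]
  rfl

-- ===== VERDICT (by name: the statement is the Claim_ definition above) =====
theorem group_and_median_spec : Claim_equal_group_and_median := by
  intro arr v _dom
  unfold Spec_group_and_median
  cases arr with
  | nil => rfl
  | cons a t =>
    obtain ⟨heq, hne, hmem⟩ := pvLoop v t [] [a] a (by simp) (by simp) (by simp)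
    simp only [List.map_nil] at heq
    rw [pvA_char, pvB_char, heq]
    simp only [List.map_append, List.map_cons, List.map_nil]
    congr 1
    · exact List.map_congr_left (fun g hg => pvMed_eq g (hmem g hg))
    · simp [pvMed_eq _ hne]
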